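-- pv_equiv track=rewrite | github.com/abjonnes/aoc2023 | aoc/day13.py | find_horizontal_mirror
-- ===== SOURCE A (Python) =====
-- def find_horizontal_mirror(map_, differences):
--     n_rows = len(map_)
--     for i in range(n_rows - 1):
--         if (
--             sum(
--                 sum(a != b for a, b in zip(map_[i - j], map_[i + 1 + j]))
--                 for j in range(min(i + 1, n_rows - i - 1))
--             )
--             == differences
--         ):
--             return i + 1
-- ===== SOURCE B (Python) =====
-- def find_horizontal_mirror(map_, differences):
--     # Stage 1: one pass over all row pairs, bucketing each pair's mismatch
--     # count into the mirror line it belongs to: pair (r, s) is reflected by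
--     # the cut between rows c-1 and c exactly when r + s == 2*c - 1.
--     n = len(map_)
--     totals = [0] * (n + 1)
--     for r in range(n):
--         for s in range(r + 1, n):
--             if (r + s) % 2:
--                 totals[(r + s + 1) // 2] += sum(
--                     x != y for x, y in zip(map_[r], map_[s])
--                 )
--     # Stage 2: scan the table for the first cut with the requested mismatches.
--     for cut in range(1, n):
--         if totals[cut] == differences:
--             return cut
-- ===== Notes on version B (the rewrite author's own statement) =====
-- stated objective: alternative
-- what changed: Replaces A's per-cut mirrored scan by a two-stage table algorithm: one pass over all row pairs buckets each pair's mismatch count into the unique cut c with r+s=2c-1, then a second pass returns the first cut whose bucket equals the target; correct because the rows mirrored around cut c are exactly the in-range pairs with index sum 2c-1.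
import Mathlib
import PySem

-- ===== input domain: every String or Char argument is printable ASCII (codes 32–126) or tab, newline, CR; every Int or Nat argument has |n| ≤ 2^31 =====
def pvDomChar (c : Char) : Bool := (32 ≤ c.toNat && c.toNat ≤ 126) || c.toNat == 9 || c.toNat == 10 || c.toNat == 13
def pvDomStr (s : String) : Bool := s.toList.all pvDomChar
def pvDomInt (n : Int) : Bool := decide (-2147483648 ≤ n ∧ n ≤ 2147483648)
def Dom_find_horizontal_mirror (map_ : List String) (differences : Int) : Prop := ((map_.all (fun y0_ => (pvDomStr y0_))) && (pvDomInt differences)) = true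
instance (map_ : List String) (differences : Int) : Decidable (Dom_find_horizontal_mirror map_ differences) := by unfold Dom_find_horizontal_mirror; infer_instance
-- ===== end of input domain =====

-- B replaces A's per-cut mirrored scan by a two-stage table algorithm: one pass over all
-- row pairs buckets each pair's mismatch count into its unique cut (r+s = 2c-1), then a
-- scan of the table returns the first cut hitting the target; same cost, alternative shape.

-- ===== PORT A =====
-- sum(a != b for a, b in zip(r1, r2))
def pvMismatchA (a b : List Char) : Int :=
  ((a.zip b).map (fun p => if p.1 ≠ p.2 then (1 : Int) else 0)).sum

def find_horizontal_mirror (map_ : List String) (differences : Int) : Option Int :=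
  let n_rows := map_.length
  (List.range (n_rows - 1)).findSome? (fun i =>
    if (((List.range (min (i + 1) (n_rows - i - 1))).map (fun j =>
          pvMismatchA (map_.getD (i - j) "").toList (map_.getD (i + 1 + j) "").toList)).sum
        = differences)
    then some ((i : Int) + 1) else none)

-- ===== PORT B =====
-- sum(x != y for x, y in zip(map_[r], map_[s]))
def pvRowDiffB (a b : List Char) : Int :=
  ((a.zip b).map (fun p => if p.1 ≠ p.2 then (1 : Int) else 0)).sum

-- the double loop filling totals, then the scan for the first matching cut
def find_horizontal_mirror_alt (map_ : List String) (differences : Int) : Option Int :=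
  let n := map_.length
  let totals := (List.range n).foldl (fun t r =>
      (List.range' (r + 1) (n - (r + 1))).foldl (fun t s =>
        if (r + s) % 2 = 1 then
          t.set ((r + s + 1) / 2)
            (t.getD ((r + s + 1) / 2) 0 +
              pvRowDiffB (map_.getD r "").toList (map_.getD s "").toList)
        else t) t)
    (List.replicate (n + 1) (0 : Int))
  (List.range' 1 (n - 1)).findSome? (fun cut =>
    if totals.getD cut 0 = differences then some ((cut : Int)) else none)

-- ===== PRECONDITION & SPEC =====
def Spec_find_horizontal_mirror (map_ : List String) (differences : Int) (out : Option Int) : Prop := out = find_horizontal_mirror_alt map_ differences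
instance (map_ : List String) (differences : Int) (out : Option Int) : Decidable (Spec_find_horizontal_mirror map_ differences out) := by unfold Spec_find_horizontal_mirror; infer_instance

-- ===== CLAIM (what is proved, stated in full; the proofs are below) =====
def Claim_equal_find_horizontal_mirror : Prop := ∀ (map_ : List String) (differences : Int), Dom_find_horizontal_mirror map_ differences → Spec_find_horizontal_mirror map_ differences (find_horizontal_mirror map_ differences)

-- ===== LEMMAS AND PROOFS =====

-- the scatter step of B's first stage, on an explicit pair
def pvStep (map_ : List String) (t : List Int) (p : Nat × Nat) : List Int :=
  if (p.1 + p.2) % 2 = 1 then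
    t.set ((p.1 + p.2 + 1) / 2)
      (t.getD ((p.1 + p.2 + 1) / 2) 0 +
        pvRowDiffB (map_.getD p.1 "").toList (map_.getD p.2 "").toList)
  else t

theorem pvStep_length (map_ : List String) (t : List Int) (p : Nat × Nat) :
    (pvStep map_ t p).length = t.length := by
  unfold pvStep; split <;> simp

-- reading one cell after folding a list of scatter updates
theorem pv_scatter (map_ : List String) (L : List (Nat × Nat)) (t : List Int) (c : Nat)
    (hc : c < t.length) :
    (L.foldl (pvStep map_) t).getD c 0
      = t.getD c 0 + (L.map (fun p =>
          if (p.1 + p.2) % 2 = 1 ∧ (p.1 + p.2 + 1) / 2 = c then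
            pvRowDiffB (map_.getD p.1 "").toList (map_.getD p.2 "").toList
          else 0)).sum := by
  induction L generalizing t with
  | nil => simp
  | cons p L ih =>
    have hl : c < (pvStep map_ t p).length := by rw [pvStep_length]; exact hc
    rw [List.foldl_cons, ih _ hl, List.map_cons, List.sum_cons]
    have hstep : (pvStep map_ t p).getD c 0
        = t.getD c 0 + (if (p.1 + p.2) % 2 = 1 ∧ (p.1 + p.2 + 1) / 2 = c then
            pvRowDiffB (map_.getD p.1 "").toList (map_.getD p.2 "").toList else 0) := by
      unfold pvStep
      by_cases h1 : (p.1 + p.2) % 2 = 1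
      · by_cases h2 : (p.1 + p.2 + 1) / 2 = c
        · simp only [h1, h2, if_pos]
          rw [List.getD_eq_getElem?_getD, List.getElem?_set_self (by omega), List.getD_eq_getElem?_getD]
          simp
        · simp only [h1, if_pos]
          rw [if_neg (by tauto)]
          rw [List.getD_eq_getElem?_getD, List.getElem?_set_ne h2, ← List.getD_eq_getElem?_getD]
          ring
      · rw [if_neg h1, if_neg (by tauto)]; ring
    rw [hstep]; ring

theorem pv_findSome?_congr {α β : Type} (l : List α) (f g : α → Option β)
    (h : ∀ a ∈ l, f a = g a) : l.findSome? f = l.findSome? g := by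
  induction l with
  | nil => rfl
  | cons x xs ih =>
    simp only [List.findSome?_cons, h x (List.mem_cons_self), ih (fun a ha => h a (List.mem_cons_of_mem _ ha))]

theorem pv_list_sum_range {M : Type} [AddCommMonoid M] (n : Nat) (f : Nat → M) :
    ((List.range n).map f).sum = ∑ i ∈ Finset.range n, f i := by
  induction n with
  | zero => simp
  | succ k ih => rw [List.range_succ, Finset.sum_range_succ]; simp [ih]

-- the table cell for cut c equals A's mirrored-scan sum at i = c - 1
theorem pv_key (map_ : List String) (c : Nat) (hc1 : 1 ≤ c) (hc2 : c ≤ map_.length - 1) :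
    (((List.range map_.length).foldl (fun t r =>
        (List.range' (r + 1) (map_.length - (r + 1))).foldl (fun t s => pvStep map_ t (r, s)) t)
      (List.replicate (map_.length + 1) (0 : Int))).getD c 0)
    = ((List.range (min c (map_.length - c))).map (fun j =>
        pvMismatchA (map_.getD (c - 1 - j) "").toList (map_.getD (c + j) "").toList)).sum := by
  have hA : pvMismatchA = pvRowDiffB := rfl
  set n := map_.length with hn
  have hcn : c < (List.replicate (n + 1) (0 : Int)).length := by
    simp only [List.length_replicate]; omega
  have hfold : (List.range n).foldl (fun t r =>
        (List.range' (r + 1) (n - (r + 1))).foldl (fun t s => pvStep map_ t (r, s)) t)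
      (List.replicate (n + 1) (0 : Int))
      = ((List.range n).flatMap (fun r =>
          (List.range' (r + 1) (n - (r + 1))).map (fun s => (r, s)))).foldl
          (pvStep map_) (List.replicate (n + 1) (0 : Int)) := by
    rw [List.foldl_flatMap]
    simp only [List.foldl_map]
  rw [hA, hfold, pv_scatter map_ _ _ c hcn, List.getD_replicate _ (by omega)]
  simp only [List.flatMap_def, List.map_flatten, List.sum_flatten, List.map_map,
    Function.comp_def, List.range'_eq_map_range, pv_list_sum_range, zero_add]
  have hinner : ∀ r : Nat,
      (∑ j ∈ Finset.range (n - (r + 1)),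
        if (r + (r + 1 + j)) % 2 = 1 ∧ (r + (r + 1 + j) + 1) / 2 = c then
          pvRowDiffB (map_.getD r "").toList (map_.getD (r + 1 + j) "").toList else 0)
      = if r + 1 ≤ c ∧ 2 * c - 2 * r - 2 < n - (r + 1) then
          pvRowDiffB (map_.getD r "").toList (map_.getD (2 * c - 1 - r) "").toList else 0 := by
    intro r
    by_cases hr : r + 1 ≤ c
    · have hcond : ∀ j : Nat,
          ((r + (r + 1 + j)) % 2 = 1 ∧ (r + (r + 1 + j) + 1) / 2 = c) ↔ j = 2 * c - 2 * r - 2 := by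
        omega
      rw [Finset.sum_congr rfl (fun j _ => if_congr (hcond j) rfl rfl),
        Finset.sum_ite_eq' (Finset.range (n - (r + 1))) (2 * c - 2 * r - 2)
          (fun j => pvRowDiffB (map_.getD r "").toList (map_.getD (r + 1 + j) "").toList)]
      have harg : r + 1 + (2 * c - 2 * r - 2) = 2 * c - 1 - r := by omega
      simp only [Finset.mem_range, harg, hr, true_and]
    · have hz : ∀ j ∈ Finset.range (n - (r + 1)),
          (if (r + (r + 1 + j)) % 2 = 1 ∧ (r + (r + 1 + j) + 1) / 2 = c then
            pvRowDiffB (map_.getD r "").toList (map_.getD (r + 1 + j) "").toList else 0) = 0 := by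
        intro j _
        rw [if_neg]; omega
      rw [Finset.sum_congr rfl hz, Finset.sum_const_zero, if_neg (by omega)]
  rw [Finset.sum_congr rfl (fun r _ => hinner r), ← Finset.sum_filter]
  refine (Finset.sum_nbij' (fun j => c - 1 - j) (fun r => c - 1 - r) ?_ ?_ ?_ ?_ ?_).symm
  · intro a ha
    simp only [Finset.mem_range, Finset.mem_filter] at ha ⊢
    omega
  · intro a ha
    simp only [Finset.mem_range, Finset.mem_filter] at ha ⊢
    omega
  · intro a ha
    simp only [Finset.mem_range] at ha
    beta_reduce
    omega
  · intro a ha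
    simp only [Finset.mem_range, Finset.mem_filter] at ha
    beta_reduce
    omega
  · intro a ha
    simp only [Finset.mem_range] at ha
    beta_reduce
    have e2 : 2 * c - 1 - (c - 1 - a) = c + a := by omega
    rw [e2]

-- ===== VERDICT (by name: the statement is the Claim_ definition above) =====
theorem find_horizontal_mirror_spec : Claim_equal_find_horizontal_mirror := by
  intro map_ differences _
  unfold Spec_find_horizontal_mirror find_horizontal_mirror find_horizontal_mirror_alt
  have hB : ∀ cutf : Nat → Option Int,
      (List.range' 1 (map_.length - 1)).findSome? cutf
        = ((List.range (map_.length - 1)).map (fun x => 1 + x)).findSome? cutf := by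
    intro cutf; rw [List.range'_eq_map_range]
  show _ = (List.range' 1 (map_.length - 1)).findSome? (fun cut =>
    if ((List.range map_.length).foldl (fun t r =>
          (List.range' (r + 1) (map_.length - (r + 1))).foldl
            (fun t s => pvStep map_ t (r, s)) t)
        (List.replicate (map_.length + 1) (0 : Int))).getD cut 0 = differences
    then some ((cut : Int)) else none)
  rw [hB, List.findSome?_map]
  apply pv_findSome?_congr
  intro i hi
  have hi' : i < map_.length - 1 := by simpa using hi
  simp only [Function.comp_def]
  rw [pv_key map_ (1 + i) (by omega) (by omega)]
  have e3 : (1 + i : Nat) = i + 1 := by omega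
  simp only [e3, Nat.add_sub_cancel, Nat.sub_sub, Nat.cast_add, Nat.cast_one]
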